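-- pv_equiv track=rewrite | github.com/Ms-211/Algorithm_python | 프로그래머스/lv1/12930. 이상한 문자 만들기/이상한 문자 만들기.py | solution
-- ===== SOURCE A (Python) =====
-- def solution(s):
--     list_s = s.split(' ')
--
--     for i in range(len(list_s)):
--         word_s = list(list_s[i])
--         for j in range(len(word_s)):
--             if j % 2 == 0:
--                 word_s[j] = word_s[j].upper()
--             else:
--                 word_s[j] = word_s[j].lower()
--         list_s[i] = ''.join(word_s)
--
--     result = ' '.join(list_s)
--
--     return result
-- ===== SOURCE B (Python) =====
-- def solution(s):
--     out = []
--     pos = 0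
--     for c in s:
--         if c == ' ':
--             out.append(' ')
--             pos = 0
--         else:
--             out.append(c.upper() if pos % 2 == 0 else c.lower())
--             pos += 1
--     return ''.join(out)
-- ===== Notes on version B (the rewrite author's own statement) =====
-- stated objective: simpler
-- what changed: Replaces split-into-words plus a nested per-word index loop and two joins with a single linear pass over the characters keeping a per-word position counter that resets at each space.
import Mathlib
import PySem

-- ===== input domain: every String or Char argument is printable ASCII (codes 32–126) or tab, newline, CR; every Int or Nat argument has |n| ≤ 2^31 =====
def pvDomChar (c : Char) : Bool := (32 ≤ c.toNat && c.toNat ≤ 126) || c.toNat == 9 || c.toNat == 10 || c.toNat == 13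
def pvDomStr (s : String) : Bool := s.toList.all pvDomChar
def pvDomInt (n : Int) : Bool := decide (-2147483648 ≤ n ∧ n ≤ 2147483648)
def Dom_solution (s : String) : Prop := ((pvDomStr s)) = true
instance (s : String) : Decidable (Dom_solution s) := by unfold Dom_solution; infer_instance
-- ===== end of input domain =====

-- B replaces A's split / nested per-word index loop / double join with one linear pass
-- keeping a per-word position counter that resets at each space (objective: simpler single pass).

-- ===== PORT A =====
-- inner 'for j in range(len(word_s))' loop: each step writes word_s[j] from word_s[j] only,
-- so the obvious structural recursion carries the index j along the word
def solWord : List Char → Nat → List Char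
  | [], _ => []
  | c :: rest, j =>
      (if j % 2 == 0 then PySem.Chars.upperChar c else PySem.Chars.lowerChar c) :: solWord rest (j + 1)

def solution (s : String) : String :=
  let listS := PySem.Chars.splitOn s.toList [' ']
  let listS' := listS.map (fun w => solWord w 0)
  String.ofList (PySem.Chars.join [' '] listS')

-- ===== PORT B =====
-- single pass: character recursion with running per-word position 'pos', reset at ' '
def altGo : List Char → Nat → List Char
  | [], _ => []
  | c :: rest, pos =>
      if c == ' ' then ' ' :: altGo rest 0
      else (if pos % 2 == 0 then PySem.Chars.upperChar c else PySem.Chars.lowerChar c) :: altGo rest (pos + 1)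

def solution_alt (s : String) : String := String.ofList (altGo s.toList 0)

-- ===== PRECONDITION & SPEC =====
def Spec_solution (s : String) (out : String) : Prop := out = solution_alt s
instance (s : String) (out : String) : Decidable (Spec_solution s out) := by unfold Spec_solution; infer_instance

-- ===== CLAIM (what is proved, stated in full; the proofs are below) =====
def Claim_equal_solution : Prop := ∀ (s : String), Dom_solution s → Spec_solution s (solution s)

-- ===== LEMMAS AND PROOFS =====

-- proof-side recursive characterisation of s.split(' ')
def mySplit : List Char → List (List Char)
  | [] => [[]]
  | c :: rest =>
      if c = ' ' then [] :: mySplit rest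
      else match mySplit rest with
        | [] => [[c]]   -- unreachable: mySplit is never []
        | w :: ws => (c :: w) :: ws

lemma mySplit_ne_nil (cs : List Char) : mySplit cs ≠ [] := by
  cases cs with
  | nil => simp [mySplit]
  | cons c rest =>
      simp only [mySplit]
      split
      · simp
      · split <;> simp

lemma splitOn_go_eq (fuel : Nat) (l cur : List Char) (acc : List (List Char))
    (h : l.length ≤ fuel) :
    PySem.Chars.splitOn.go [' '] fuel l cur acc =
      acc.reverse ++ (match mySplit l with
        | [] => []
        | w :: ws => (cur.reverse ++ w) :: ws) := by
  induction fuel generalizing l cur acc with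
  | zero =>
      have : l = [] := by cases l <;> simp_all
      subst this
      simp [PySem.Chars.splitOn.go, mySplit]
  | succ n ih =>
      cases l with
      | nil => simp [PySem.Chars.splitOn.go, mySplit]
      | cons c rest =>
          by_cases hc : c = ' '
          · subst hc
            have : ([' '] : List Char).isPrefixOf (' ' :: rest) = true := by
              simp [List.isPrefixOf]
            rw [PySem.Chars.splitOn.go]
            simp only [this, if_true]
            have hd : List.drop ([' '] : List Char).length (' ' :: rest) = rest := rfl
            rw [hd, ih rest [] (cur.reverse :: acc) (by simpa using Nat.le_of_succ_le_succ h)]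
            rw [show mySplit (' ' :: rest) = [] :: mySplit rest from by simp [mySplit]]
            cases hms : mySplit rest with
            | nil => exact absurd hms (mySplit_ne_nil rest)
            | cons w ws =>
                simp only [List.reverse_cons, List.reverse_nil, List.append_assoc,
                  List.singleton_append, List.nil_append, List.append_nil]
          · have : ([' '] : List Char).isPrefixOf (c :: rest) = false := by
              simp [List.isPrefixOf]
              exact fun h => hc h.symm
            rw [PySem.Chars.splitOn.go]
            simp only [this, Bool.false_eq_true, if_false]
            rw [ih rest (c :: cur) acc (by simpa using Nat.le_of_succ_le_succ h)]
            rw [show mySplit (c :: rest) =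
                (match mySplit rest with
                  | [] => [[c]]
                  | w :: ws => (c :: w) :: ws) from by simp [mySplit, hc]]
            cases hms : mySplit rest with
            | nil => exact absurd hms (mySplit_ne_nil rest)
            | cons w ws =>
                simp only [List.reverse_cons, List.append_assoc, List.singleton_append]

lemma splitOn_eq_mySplit (cs : List Char) :
    PySem.Chars.splitOn cs [' '] = mySplit cs := by
  rw [PySem.Chars.splitOn, splitOn_go_eq cs.length.succ cs [] [] (Nat.le_succ _)]
  cases hms : mySplit cs with
  | nil => exact absurd hms (mySplit_ne_nil cs)
  | cons w ws => simp

-- per-word transforms of a split, the head transformed from offset j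
def mh (j : Nat) : List (List Char) → List (List Char)
  | [] => []
  | w :: ws => solWord w j :: ws.map (fun w => solWord w 0)

lemma join_cons_cons (a w : List Char) (ws : List (List Char)) :
    PySem.Chars.join [' '] (a :: w :: ws) = a ++ ' ' :: PySem.Chars.join [' '] (w :: ws) := by
  simp [PySem.Chars.join, List.intercalate]

lemma altGo_eq_join (cs : List Char) : ∀ j,
    altGo cs j = PySem.Chars.join [' '] (mh j (mySplit cs)) := by
  induction cs with
  | nil => intro j; simp [altGo, mySplit, mh, PySem.Chars.join, List.intercalate, solWord]
  | cons c rest ih =>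
      intro j
      by_cases hc : c = ' '
      · subst hc
        have h1 : mySplit (' ' :: rest) = [] :: mySplit rest := by simp [mySplit]
        rw [show altGo (' ' :: rest) j = ' ' :: altGo rest 0 from by simp [altGo], h1, ih 0]
        cases hms : mySplit rest with
        | nil => exact absurd hms (mySplit_ne_nil rest)
        | cons w ws =>
            simp only [mh, solWord, List.map_cons]
            rw [join_cons_cons]
            simp
      · have hcb : (c == ' ') = false := by simp [hc]
        have h1 : mySplit (c :: rest) =
            (match mySplit rest with
              | [] => [[c]]
              | w :: ws => (c :: w) :: ws) := by
          simp [mySplit, hc]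
        simp only [altGo, hcb, Bool.false_eq_true, if_false]
        rw [ih (j + 1), h1]
        cases hms : mySplit rest with
        | nil => exact absurd hms (mySplit_ne_nil rest)
        | cons w ws =>
            simp only [mh, solWord]
            cases ws with
            | nil => simp [PySem.Chars.join, List.intercalate]
            | cons w' ws' =>
                simp only [List.map_cons]
                rw [join_cons_cons, join_cons_cons]
                simp

lemma mh_zero (ws : List (List Char)) : mh 0 ws = ws.map (fun w => solWord w 0) := by
  cases ws <;> simp [mh]

-- ===== VERDICT (by name: the statement is the Claim_ definition above) =====
theorem solution_spec : Claim_equal_solution := by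
  intro s _
  unfold Spec_solution solution solution_alt
  rw [splitOn_eq_mySplit, altGo_eq_join s.toList 0, mh_zero]
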